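-- pv_equiv track=rewrite | github.com/sr-murthy/inttools | sequences/champernowne.py | champernowne_sequence_term
-- ===== SOURCE A (Python) =====
-- def champernowne_sequence_term(n):
--     """
--         Returns the n-th digit of the fractional part of the Champernowne
--         constant.
--     """
--     d = 0
--     m = 1
--     while True:
--         for c in str(m):
--             d += 1
--             if d == n:
--                 return int(c)
--         m += 1
-- ===== SOURCE B (Python) =====
-- def champernowne_sequence_term(n):
--     """
--         Returns the n-th digit of the fractional part of the Champernowne
--         constant.
--     """
--     L, count, start = 1, 9, 1
--     while n > L * count:
--         n -= L * count
--         L += 1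
--         count *= 10
--         start *= 10
--     num = start + (n - 1) // L
--     return int(str(num)[(n - 1) % L])
-- ===== Notes on version B (the rewrite author's own statement) =====
-- stated objective: faster
-- what changed: Instead of appending digits of 1,2,3,... one by one until the n-th is reached, B locates the digit-length block by subtracting block sizes L*9*10^(L-1), then computes the containing number and digit offset by division.
import Mathlib
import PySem

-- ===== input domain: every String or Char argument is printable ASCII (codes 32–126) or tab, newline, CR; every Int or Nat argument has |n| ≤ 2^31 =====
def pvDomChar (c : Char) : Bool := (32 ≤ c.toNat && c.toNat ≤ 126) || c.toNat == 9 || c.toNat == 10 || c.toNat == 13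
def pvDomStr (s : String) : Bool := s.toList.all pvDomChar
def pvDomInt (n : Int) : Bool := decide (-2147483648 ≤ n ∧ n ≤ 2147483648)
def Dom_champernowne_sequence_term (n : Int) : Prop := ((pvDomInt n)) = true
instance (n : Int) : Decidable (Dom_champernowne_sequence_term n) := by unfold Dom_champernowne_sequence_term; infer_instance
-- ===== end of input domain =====

-- B replaces A's digit-by-digit scan over 1,2,3,… with block arithmetic: subtract the
-- sizes L*9*10^(L-1) of the digit-length blocks, then find the number and offset by division.

-- ===== PORT A =====
-- int(c) for a single character (here always a decimal digit); shared by both ports.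
def pyIntOfChar (c : Char) : Int := (PySem.Int.ofChars? [c]).getD 0

-- the inner `for c in str(m)` loop: d += 1; if d == n: return int(c); else fall through with the new d
def scanA (n : Int) : List Char → Int → Sum Int Int
  | [], d => .inr d
  | c :: cs, d =>
    let d' := d + 1
    if d' = n then .inl (pyIntOfChar c) else scanA n cs d'

-- the outer `while True: … m += 1` loop; fuel n.toNat bounds its iterations (for n ≥ 1 the
-- loop returns within the first n numbers); fuel runs out only where Python diverges (n ≤ 0)
def loopA (n : Int) : Nat → Int → Int → Int
  | 0, _, _ => 0
  | fuel + 1, d, m =>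
    match scanA n (PySem.Int.toChars m) d with
    | .inl v => v
    | .inr d' => loopA n fuel d' (m + 1)

def champernowne_sequence_term (n : Int) : Int := loopA n n.toNat 0 1

-- ===== PORT B =====
-- the `while n > L * count` loop of Source B, returning the final (n, L, start); fuel n.toNat
-- bounds its iterations (n shrinks by at least 9 each round while the guard holds)
def loopB : Nat → Int → Int → Int → Int → Int × Int × Int
  | 0, n, L, _, start => (n, L, start)
  | fuel + 1, n, L, count, start =>
    if L * count < n then loopB fuel (n - L * count) (L + 1) (count * 10) (start * 10)
    else (n, L, start)

-- num = start + (n - 1) // L; int(str(num)[(n - 1) % L]); pyGet? is the [] lookup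
-- (in range for every n ≥ 1; the none branch only makes the lookup total)
def extractB (st : Int × Int × Int) : Int :=
  match PySem.List.pyGet? (PySem.Int.toChars (st.2.2 + PySem.Int.floordiv (st.1 - 1) st.2.1))
      (PySem.Int.mod (st.1 - 1) st.2.1) with
  | some c => pyIntOfChar c
  | none => 0

def champernowne_sequence_term_alt (n : Int) : Int := extractB (loopB n.toNat n 1 9 1)

-- ===== PRECONDITION & SPEC =====
-- A's `while True` loop never returns for n ≤ 0 (its counter d only takes the values 1,2,3,…),
-- so exactly those inputs are excluded: Python A diverges there.
def Pre_champernowne_sequence_term (n : Int) : Prop := 1 ≤ n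
instance (n : Int) : Decidable (Pre_champernowne_sequence_term n) := by unfold Pre_champernowne_sequence_term; infer_instance
def pvWitness_champernowne_sequence_term : Int := 12

def Spec_champernowne_sequence_term (n : Int) (out : Int) : Prop := out = champernowne_sequence_term_alt n
instance (n : Int) (out : Int) : Decidable (Spec_champernowne_sequence_term n out) := by unfold Spec_champernowne_sequence_term; infer_instance

-- ===== CLAIM (what is proved, stated in full; the proofs are below) =====
def Claim_equal_champernowne_sequence_term : Prop := ∀ (n : Int), Dom_champernowne_sequence_term n → Pre_champernowne_sequence_term n → Spec_champernowne_sequence_term n (champernowne_sequence_term n)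

-- ===== LEMMAS AND PROOFS =====

-- exact length of Nat.toDigitsCore given enough fuel
lemma tdc_len : ∀ (f : Nat), ∀ (n : Nat) (l : List Char), 0 < f → n < 10 ^ f →
    (Nat.toDigitsCore 10 f n l).length = l.length + Nat.log 10 n + 1 := by
  intro f
  induction f with
  | zero => intro n l h; omega
  | succ f ih =>
    intro n l _ hlt
    rw [Nat.toDigitsCore]
    by_cases h10 : n / 10 = 0
    · have hn : n < 10 := by omega
      simp [h10, Nat.log_eq_zero_iff.mpr (Or.inl hn)]
    · have hn : 10 ≤ n := by
        by_contra h; exact h10 (Nat.div_eq_of_lt (by omega))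
    -- f > 0 since 10 ≤ n < 10^(f+1)
      have hf : 0 < f := by
        rcases Nat.eq_zero_or_pos f with h | h
        · subst h; simp at hlt; omega
        · exact h
      have hdiv : n / 10 < 10 ^ f := by
        rw [Nat.div_lt_iff_lt_mul (by norm_num : 0 < 10), ← pow_succ]
        exact hlt
      simp only [h10, if_false]
      rw [ih (n / 10) _ hf hdiv]
      have hlog : Nat.log 10 (n / 10) = Nat.log 10 n - 1 := Nat.log_div_base 10 n
      have hpos : 0 < Nat.log 10 n := Nat.log_pos (by norm_num) hn
      simp only [List.length_cons]
      omega

-- str(m) of an L-digit positive integer has exactly L characters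
lemma toChars_len (L : Nat) (m : Int) (hL : 1 ≤ L)
    (h1 : (10:Int) ^ (L - 1) ≤ m) (h2 : m < (10:Int) ^ L) :
    (PySem.Int.toChars m).length = L := by
  have hm1 : (1:Int) ≤ m := le_trans (one_le_pow₀ (by norm_num)) h1
  have hmn : ¬ m < 0 := by omega
  rw [PySem.Int.toChars]
  simp only [hmn, if_false]
  rw [Nat.toDigits]
  have hfuel : m.toNat < 10 ^ (m.toNat + 1) := by
    calc m.toNat < 10 ^ m.toNat := Nat.lt_pow_self (by norm_num)
    _ ≤ 10 ^ (m.toNat + 1) := Nat.pow_le_pow_right (by norm_num) (by omega)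
  rw [tdc_len (m.toNat + 1) m.toNat [] (by omega) hfuel]
  have hlo : 10 ^ (L - 1) ≤ m.toNat := by
    have : ((10:Int) ^ (L-1)) = ((10 ^ (L-1) : Nat) : Int) := by push_cast; ring
    omega
  have hhi : m.toNat < 10 ^ L := by
    have : ((10:Int) ^ L) = ((10 ^ L : Nat) : Int) := by push_cast; ring
    omega
  have : Nat.log 10 m.toNat = L - 1 := by
    apply Nat.log_eq_of_pow_le_of_lt_pow hlo
    have : L - 1 + 1 = L := by omega
    rw [this]; exact hhi
  simp [this]; omega

-- the inner loop falls through when the target is not among these characters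
lemma scanA_miss (n : Int) : ∀ (cs : List Char) (d : Int),
    (n ≤ d ∨ d + cs.length < n) → scanA n cs d = .inr (d + cs.length) := by
  intro cs
  induction cs with
  | nil => intro d _; simp [scanA]
  | cons c cs ih =>
    intro d hd
    simp only [List.length_cons] at hd
    have hne : ¬ (d + 1 = n) := by push_cast at hd ⊢; omega
    rw [scanA]
    simp only [hne, if_false]
    rw [ih (d + 1) (by push_cast at hd ⊢; omega)]
    simp only [List.length_cons]
    push_cast
    ring_nf

-- the inner loop returns the digit at offset n - d - 1 when the target lies inside
lemma scanA_hit (n : Int) : ∀ (cs : List Char) (d : Int),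
    d < n → n ≤ d + cs.length →
    scanA n cs d = .inl (pyIntOfChar (cs.getD (n - d - 1).toNat ' ')) := by
  intro cs
  induction cs with
  | nil => intro d h1 h2; simp at h2; omega
  | cons c cs ih =>
    intro d h1 h2
    rw [scanA]
    by_cases he : d + 1 = n
    · have : (n - d - 1).toNat = 0 := by omega
      simp [he, this]
    · simp only [he, if_false]
      simp only [List.length_cons] at h2
      rw [ih (d + 1) (by omega) (by push_cast at h2 ⊢; omega)]
      have hpos : 0 < n - d - 1 := by omega
      have : (n - d - 1).toNat = (n - (d+1) - 1).toNat + 1 := by omega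
      simp [this]

-- B's loop stops as soon as the guard fails, whatever the fuel
lemma loopB_stop (fuel : Nat) (n L count start : Int) (h : ¬ L * count < n) :
    loopB fuel n L count start = (n, L, start) := by
  cases fuel with
  | zero => rfl
  | succ f => rw [loopB]; simp [h]

-- 10^L = 10 * 10^(L-1) for L ≥ 1
lemma pow_pred (L : Nat) (hL : 1 ≤ L) : (10:Int) ^ L = 10 * 10 ^ (L - 1) := by
  have h : L - 1 + 1 = L := by omega
  calc (10:Int) ^ L = 10 ^ (L - 1 + 1) := by rw [h]
  _ = 10 ^ (L - 1) * 10 := pow_succ _ _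
  _ = 10 * 10 ^ (L - 1) := by ring

-- MAIN LEMMA: A's scan from state (d, m) inside the L-digit block equals B's
-- block-arithmetic extraction from the corresponding loop state.
lemma mainAB (n : Int) : ∀ (fuelA : Nat) (fuelB : Nat) (d m : Int) (L : Nat),
    1 ≤ L → (10:Int) ^ (L - 1) ≤ m → m < (10:Int) ^ L → d < n →
    (n - d).toNat ≤ fuelA → (n - d).toNat ≤ fuelB →
    loopA n fuelA d m =
      extractB (loopB fuelB (n - d + L * (m - 10 ^ (L - 1))) L (9 * 10 ^ (L - 1)) (10 ^ (L - 1))) := by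
  intro fuelA
  induction fuelA with
  | zero => intro fuelB d m L _ _ _ hdn hfa _; omega
  | succ fuelA ih =>
    intro fuelB d m L hL h1 h2 hdn hfa hfb
    have hpow := pow_pred L hL
    have hs1 : (1:Int) ≤ 10 ^ (L - 1) := one_le_pow₀ (by norm_num)
    have hLi : (1:Int) ≤ (L:Int) := by exact_mod_cast hL
    have hlen : (PySem.Int.toChars m).length = L := toChars_len L m hL h1 h2
    rw [loopA]
    by_cases hhit : n ≤ d + L
    · -- the target digit is inside str(m)
      rw [scanA_hit n _ d hdn (by rw [hlen]; exact hhit)]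
      rw [loopB_stop]
      · -- extraction agrees
        have harg : n - d + L * (m - 10 ^ (L - 1)) - 1
            = (n - d - 1) + (L:Int) * (m - 10 ^ (L - 1)) := by ring
        have hoff0 : (0:Int) ≤ n - d - 1 := by omega
        have hoffL : n - d - 1 < (L:Int) := by omega
        have hdiv : PySem.Int.floordiv (n - d + L * (m - 10 ^ (L - 1)) - 1) L
            = m - 10 ^ (L - 1) := by
          rw [harg, PySem.Int.floordiv_eq_ediv_of_pos (by omega)]
          rw [Int.add_mul_ediv_left _ _ (by omega)]
          rw [Int.ediv_eq_zero_of_lt hoff0 hoffL]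
          ring
        have hmod : PySem.Int.mod (n - d + L * (m - 10 ^ (L - 1)) - 1) L
            = n - d - 1 := by
          rw [harg, PySem.Int.mod_eq_emod_of_pos (by omega)]
          rw [Int.add_mul_emod_self_left]
          exact Int.emod_eq_of_lt hoff0 hoffL
        simp only [extractB, hdiv, hmod]
        have hnum : (10:Int) ^ (L - 1) + (m - 10 ^ (L - 1)) = m := by ring
        rw [hnum]
        have hidx : (n - d).toNat - 1 < (PySem.Int.toChars m).length := by
          rw [hlen]; omega
        have hix : (n - d - 1).toNat = (n - d).toNat - 1 := by omega
        rw [PySem.List.pyGet?]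
        rw [PySem.List.pyIdx?]
        simp only [hoff0, if_true, hlen]
        rw [if_pos (by exact_mod_cast hoffL)]
        simp [List.getD, hix, List.getElem?_eq_getElem hidx]
      · -- B's loop guard fails at this state
        have hm' : m ≤ 10 ^ L - 1 := by omega
        have : n - d + (L:Int) * (m - 10 ^ (L - 1))
            ≤ L + L * (10 ^ L - 1 - 10 ^ (L - 1)) := by
          have := mul_le_mul_of_nonneg_left (by omega : m - 10 ^ (L-1) ≤ 10 ^ L - 1 - 10 ^ (L-1)) (by omega : (0:Int) ≤ (L:Int))
          omega
        have heq : (L:Int) + L * (10 ^ L - 1 - 10 ^ (L - 1)) = L * (9 * 10 ^ (L - 1)) := by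
          rw [hpow]; ring
        omega
    · -- the target digit is beyond str(m): A advances to m + 1
      push Not at hhit
      rw [scanA_miss n _ d (by rw [hlen]; omega)]
      rw [hlen]
      dsimp only
      by_cases hm : m + 1 < 10 ^ L
      · -- still inside the same block: B's state is unchanged
        have := ih fuelB (d + L) (m + 1) L hL (by omega) hm (by omega) (by omega) (by omega)
        rw [this]
        have : n - (d + L) + (L:Int) * (m + 1 - 10 ^ (L - 1))
            = n - d + L * (m - 10 ^ (L - 1)) := by ring
        rw [this]
      · -- m + 1 = 10^L: A enters the next block and B's loop steps once
        have hm1 : m + 1 = 10 ^ L := by omega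
        rw [hm1]
        cases fuelB with
        | zero => omega
        | succ fuelB =>
          rw [loopB]
          rw [if_pos]
          · have hL1 : 1 ≤ L + 1 := by omega
            have hb1 : (10:Int) ^ ((L+1) - 1) ≤ 10 ^ L := by norm_num
            have hb2 : (10:Int) ^ L < 10 ^ (L + 1) := by
              have : (10:Int) ^ (L+1) = 10 * 10 ^ L := pow_pred (L+1) (by omega)
              nlinarith [hs1, hpow]
            have := ih fuelB (d + L) (10 ^ L) (L + 1) hL1 hb1 hb2 (by omega) (by omega) (by omega)
            rw [this]
            have e1 : n - (d + (L:Int)) + ((L:Int) + 1) * ((10:Int) ^ L - 10 ^ ((L+1) - 1))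
                = n - d + L * (m - 10 ^ (L - 1)) - L * (9 * 10 ^ (L - 1)) := by
              simp only [Nat.add_sub_cancel]
              rw [hpow]
              have : m = 10 * 10 ^ (L - 1) - 1 := by omega
              rw [this]; ring
            have e2 : ((9:Int) * 10 ^ (L - 1)) * 10 = 9 * 10 ^ ((L + 1) - 1) := by
              simp only [Nat.add_sub_cancel]
              rw [hpow]; ring
            have e3 : ((10:Int) ^ (L - 1)) * 10 = 10 ^ ((L + 1) - 1) := by
              simp only [Nat.add_sub_cancel]
              rw [hpow]; ring
            push_cast at e1 ⊢
            rw [e1, e2, e3]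
            simp only [Nat.add_sub_cancel]
          · -- the guard holds: n - d > L and m is the last L-digit number
            have : m - 10 ^ (L - 1) = 9 * 10 ^ (L - 1) - 1 := by omega
            rw [this]
            nlinarith [hLi, hs1]

-- ===== VERDICT (by name: the statement is the Claim_ definition above) =====
theorem champernowne_sequence_term_spec : Claim_equal_champernowne_sequence_term := by
  intro n _ hpre
  unfold Spec_champernowne_sequence_term champernowne_sequence_term champernowne_sequence_term_alt
  have hpre' : (1:Int) ≤ n := hpre
  have := mainAB n n.toNat n.toNat 0 1 1 le_rfl (by norm_num) (by norm_num)
    (by omega) (by omega) (by omega)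
  rw [this]
  norm_num
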